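-- pv_equiv track=rewrite | github.com/jsatt/advent | d1/p2.py | calc_floor
-- ===== SOURCE A (Python) =====
-- def calc_floor(directions):
--     floor = 0
--     for i, inst in enumerate(directions):
--         if inst == '(':
--             floor += 1
--         elif inst == ')':
--             floor -= 1
--
--         if floor < 0:
--             return i + 1
--
--     return floor
-- ===== SOURCE B (Python) =====
-- def _solve(s, need):
--     """Return (sum of the +1/-1/0 deltas of s,
--     1-based index of the first prefix sum of s that is < need, or None),
--     by divide and conquer on the string."""
--     if not s:
--         return (0, None)
--     if len(s) == 1:
--         d = 1 if s == '(' else -1 if s == ')' else 0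
--         return (d, 1 if d < need else None)
--     mid = len(s) // 2
--     tl, il = _solve(s[:mid], need)
--     tr, ir = _solve(s[mid:], need - tl)
--     idx = il if il is not None else (None if ir is None else mid + ir)
--     return (tl + tr, idx)
--
--
-- def calc_floor(directions):
--     total, idx = _solve(directions, 0)
--     return total if idx is None else idx
-- ===== Notes on version B (the rewrite author's own statement) =====
-- stated objective: alternative
-- what changed: Replaced the linear running-sum scan with early return by a divide-and-conquer algorithm: the string is split in half recursively, each segment reports (total delta, first position whose prefix sum drops below a threshold), and halves are combined by querying the right half at threshold shifted by the left half's total.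
import Mathlib
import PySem

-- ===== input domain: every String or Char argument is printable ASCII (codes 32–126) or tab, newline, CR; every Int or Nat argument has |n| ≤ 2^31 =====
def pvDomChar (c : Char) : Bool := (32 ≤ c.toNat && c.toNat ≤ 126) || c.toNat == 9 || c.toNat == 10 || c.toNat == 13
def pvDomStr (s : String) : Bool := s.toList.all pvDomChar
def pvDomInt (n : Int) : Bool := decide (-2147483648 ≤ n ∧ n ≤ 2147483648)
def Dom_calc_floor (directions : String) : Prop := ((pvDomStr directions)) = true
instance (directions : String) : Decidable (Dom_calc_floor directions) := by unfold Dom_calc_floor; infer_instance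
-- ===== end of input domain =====

-- B replaces A's linear scan by a divide-and-conquer segment combination (alternative decomposition, same complexity).
-- ===== PORT A =====
-- A's loop: running floor with 0-based index, early return i+1 on floor < 0, else final floor.
def calcFloorLoop : List Char → Int → Int → Int
  | [], floor, _ => floor
  | inst :: rest, floor, i =>
    let floor' := if inst = '(' then floor + 1 else if inst = ')' then floor - 1 else floor
    if floor' < 0 then i + 1 else calcFloorLoop rest floor' (i + 1)

def calc_floor (directions : String) : Int := calcFloorLoop directions.toList 0 0

-- ===== PORT B =====
-- delta of one character
def pvDelta (c : Char) : Int := if c = '(' then 1 else if c = ')' then -1 else 0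

-- _solve(s, need): (sum of deltas of s, 1-based index of first prefix sum < need, or None)
def pvSolve : List Char → Int → Int × Option Nat
  | [], _ => (0, none)
  | [c], need => (pvDelta c, if pvDelta c < need then some 1 else none)
  | c1 :: c2 :: rest, need =>
    let l := c1 :: c2 :: rest
    let mid := l.length / 2
    let p := pvSolve (l.take mid) need
    let q := pvSolve (l.drop mid) (need - p.1)
    (p.1 + q.1, match p.2 with | some i => some i | none => q.2.map (· + mid))
termination_by l _ => l.length
decreasing_by
  · simp [List.length_take]; omega
  · simp [List.length_drop]; omega

def calc_floor_alt (directions : String) : Int :=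
  let r := pvSolve directions.toList 0
  match r.2 with
  | some i => (i : Int)
  | none => r.1

-- ===== PRECONDITION & SPEC =====
def Spec_calc_floor (directions : String) (out : Int) : Prop := out = calc_floor_alt directions
instance (directions : String) (out : Int) : Decidable (Spec_calc_floor directions out) := by unfold Spec_calc_floor; infer_instance

-- ===== CLAIM (what is proved, stated in full; the proofs are below) =====
def Claim_equal_calc_floor : Prop := ∀ (directions : String), Dom_calc_floor directions → Spec_calc_floor directions (calc_floor directions)

-- ===== LEMMAS AND PROOFS =====
-- Reference characterisation shared by both proofs: total delta and first 1-based
-- index whose prefix sum is < need, as a straightforward linear recursion.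
def sumD (l : List Char) : Int := (l.map pvDelta).sum

def firstIdx : List Char → Int → Option Nat
  | [], _ => none
  | c :: rest, need =>
    if pvDelta c < need then some 1 else (firstIdx rest (need - pvDelta c)).map (· + 1)

theorem sumD_append (l1 l2 : List Char) : sumD (l1 ++ l2) = sumD l1 + sumD l2 := by
  simp [sumD]

theorem firstIdx_append (l1 l2 : List Char) (need : Int) :
    firstIdx (l1 ++ l2) need =
      match firstIdx l1 need with
      | some i => some i
      | none => (firstIdx l2 (need - sumD l1)).map (· + l1.length) := by
  induction l1 generalizing need with
  | nil =>
    simp only [List.nil_append, firstIdx, sumD, List.map, List.sum_nil]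
    rw [show need - 0 = need by ring]
    cases firstIdx l2 need <;> simp
  | cons c l1 ih =>
    simp only [List.cons_append, firstIdx]
    by_cases h : pvDelta c < need
    · simp [h]
    · simp only [if_neg h]
      rw [ih]
      cases h1 : firstIdx l1 (need - pvDelta c) with
      | some i => simp
      | none =>
        simp only [Option.map_map]
        cases h2 : firstIdx l2 (need - pvDelta c - sumD l1) with
        | none =>
          have : need - pvDelta c - sumD l1 = need - sumD (c :: l1) := by
            simp [sumD]; ring
          rw [this] at h2
          simp [h2]
        | some j =>
          have : need - pvDelta c - sumD l1 = need - sumD (c :: l1) := by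
            simp [sumD]; ring
          rw [this] at h2
          simp [h2, List.length_cons]


theorem pvSolve_eq (l : List Char) (need : Int) :
    pvSolve l need = (sumD l, firstIdx l need) := by
  fun_induction pvSolve l need with
  | case1 need => simp [sumD, firstIdx]
  | case2 c need => simp [sumD, firstIdx]
  | case3 c1 c2 rest need l mid p q ihp ihp' ihq =>
    clear ihp'
    have hlen : (List.take mid l).length = mid := by
      simp only [List.length_take, l, mid]; omega
    have hsplit : List.take mid l ++ List.drop mid l = l := List.take_append_drop _ _
    simp only [q, p, ihp] at ihq ⊢
    rw [ihq]
    rw [show (sumD l, firstIdx l need)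
        = (sumD (List.take mid l ++ List.drop mid l), firstIdx (List.take mid l ++ List.drop mid l) need) by rw [hsplit]]
    rw [sumD_append, firstIdx_append, hlen]

theorem loop_eq (l : List Char) (f i : Int) :
    calcFloorLoop l f i =
      match firstIdx l (-f) with
      | some k => i + (k : Int)
      | none => f + sumD l := by
  induction l generalizing f i with
  | nil => simp [calcFloorLoop, firstIdx, sumD]
  | cons c rest ih =>
    have hstep : (if c = '(' then f + 1 else if c = ')' then f - 1 else f) = f + pvDelta c := by
      unfold pvDelta; split_ifs <;> ring
    simp only [calcFloorLoop, hstep, firstIdx]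
    by_cases h : f + pvDelta c < 0
    · have h' : pvDelta c < -f := by omega
      simp [h, h']
    · have h' : ¬ pvDelta c < -f := by omega
      simp only [h, if_neg h', ite_false]
      rw [ih]
      have hn : -f - pvDelta c = -(f + pvDelta c) := by ring
      rw [← hn]
      cases hf : firstIdx rest (-f - pvDelta c) with
      | some k => simp; ring
      | none => simp [sumD]; ring

-- ===== VERDICT (by name: the statement is the Claim_ definition above) =====
theorem calc_floor_spec : Claim_equal_calc_floor := by
  intro directions _
  unfold Spec_calc_floor calc_floor calc_floor_alt
  rw [loop_eq, pvSolve_eq]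
  simp
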